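-- pv_equiv track=rewrite | github.com/AndresArias02/from-clasico-to-cuantico | libreria3.py | accionmatrizvectorCplx
-- ===== SOURCE A (Python) =====
-- def sumacplx(a, b):
--     real = a[0] + b[0]
--     img = a[1] + b[1]
--     return (real, img)
--
-- def multcplx(a, b):
--     real = (a[0] * b[0]) - (a[1] * b[1])
--     img = (a[0] * b[1]) + (a[1] * b[0])
--     return (real, img)
--
-- def accionmatrizvectorCplx(A,v):
--     filas = len(A)
--     columnas = len(A[0])
--     matriz = []
--     for i in range(filas):
--         suma = (0,0)
--         for j in range(columnas):
--             suma = sumacplx(suma, multcplx(A[i][j], v[j][0]))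
--         matriz = matriz + [(suma)]
--     return matriz
-- ===== SOURCE B (Python) =====
-- def accionmatrizvectorCplx(A, v):
--     filas = len(A)
--     columnas = len(A[0])
--     result = [(0, 0)] * filas
--     for j in range(columnas):
--         vj = v[j][0]
--         result = [(result[i][0] + A[i][j][0] * vj[0] - A[i][j][1] * vj[1],
--                    result[i][1] + A[i][j][0] * vj[1] + A[i][j][1] * vj[0])
--                   for i in range(filas)]
--     return result
-- ===== Notes on version B (the rewrite author's own statement) =====
-- stated objective: alternative
-- what changed: B computes the product column-by-column as a linear combination of A's columns (outer loop over columns, rebuilding the whole result vector each step, with the complex arithmetic inlined), instead of A's row-by-row dot products with sumacplx/multcplx; per-element accumulation order (j increasing) is preserved.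
import Mathlib
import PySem

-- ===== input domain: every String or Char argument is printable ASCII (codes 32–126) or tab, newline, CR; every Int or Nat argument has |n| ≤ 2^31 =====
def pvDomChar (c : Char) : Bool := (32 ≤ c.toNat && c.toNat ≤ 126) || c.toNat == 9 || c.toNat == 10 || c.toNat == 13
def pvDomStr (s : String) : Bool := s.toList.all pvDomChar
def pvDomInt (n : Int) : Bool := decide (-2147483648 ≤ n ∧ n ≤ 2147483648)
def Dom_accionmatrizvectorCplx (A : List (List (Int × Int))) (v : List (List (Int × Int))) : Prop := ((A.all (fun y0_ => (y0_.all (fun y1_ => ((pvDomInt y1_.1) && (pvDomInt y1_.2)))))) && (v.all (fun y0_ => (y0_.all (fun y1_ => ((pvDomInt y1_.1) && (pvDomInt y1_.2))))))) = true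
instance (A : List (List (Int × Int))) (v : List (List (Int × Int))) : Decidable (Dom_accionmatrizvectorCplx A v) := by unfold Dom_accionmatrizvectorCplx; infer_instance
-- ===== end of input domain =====

-- B computes the complex matrix-vector product column-by-column as a linear combination of
-- A's columns, with the complex arithmetic inlined, instead of A's row-by-row dot products
-- via sumacplx/multcplx (objective: alternative decomposition; same accumulation order).

-- ===== PORT A =====
def sumacplx (a b : Int × Int) : Int × Int := (a.1 + b.1, a.2 + b.2)

def multcplx (a b : Int × Int) : Int × Int := (a.1 * b.1 - a.2 * b.2, a.1 * b.2 + a.2 * b.1)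

-- indexing is via getD; under Pre_ every access is in range, so it equals Python's A[i][j]/v[j][0]
def accionmatrizvectorCplx (A : List (List (Int × Int))) (v : List (List (Int × Int))) : List (Int × Int) :=
  let filas := A.length
  let columnas := A.headI.length
  (List.range filas).foldl (fun matriz i =>
    matriz ++ [(List.range columnas).foldl (fun suma j =>
      sumacplx suma (multcplx ((A.getD i []).getD j (0, 0)) ((v.getD j []).getD 0 (0, 0)))) ((0 : Int), (0 : Int))]) []

-- ===== PORT B =====
def accionmatrizvectorCplx_alt (A : List (List (Int × Int))) (v : List (List (Int × Int))) : List (Int × Int) :=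
  let filas := A.length
  let columnas := A.headI.length
  (List.range columnas).foldl (fun result j =>
    let vj := (v.getD j []).getD 0 (0, 0)
    (List.range filas).map (fun i =>
      let a := (A.getD i []).getD j (0, 0)
      let r := result.getD i (0, 0)
      (r.1 + a.1 * vj.1 - a.2 * vj.2, r.2 + a.1 * vj.2 + a.2 * vj.1)))
    (List.replicate filas ((0 : Int), (0 : Int)))

-- ===== PRECONDITION & SPEC =====
-- Pre_ excludes exactly the inputs where Python A raises IndexError: empty A (len(A[0])),
-- a row shorter than the first row, v shorter than the first row, or an empty entry of v used.
def Pre_accionmatrizvectorCplx (A : List (List (Int × Int))) (v : List (List (Int × Int))) : Prop :=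
  A ≠ [] ∧ (∀ r ∈ A, A.headI.length ≤ r.length) ∧ A.headI.length ≤ v.length ∧
    ∀ u ∈ v.take A.headI.length, u ≠ []
instance (A : List (List (Int × Int))) (v : List (List (Int × Int))) : Decidable (Pre_accionmatrizvectorCplx A v) := by unfold Pre_accionmatrizvectorCplx; infer_instance

def pvWitness_accionmatrizvectorCplx : (List (List (Int × Int))) × (List (List (Int × Int))) :=
  ([[(1, 2), (3, 4)], [(0, 1), (1, 0)]], [[(1, 1)], [(2, 0)]])

def Spec_accionmatrizvectorCplx (A : List (List (Int × Int))) (v : List (List (Int × Int))) (out : List (Int × Int)) : Prop := out = accionmatrizvectorCplx_alt A v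
instance (A : List (List (Int × Int))) (v : List (List (Int × Int))) (out : List (Int × Int)) : Decidable (Spec_accionmatrizvectorCplx A v out) := by unfold Spec_accionmatrizvectorCplx; infer_instance

-- ===== CLAIM (what is proved, stated in full; the proofs are below) =====
def Claim_equal_accionmatrizvectorCplx : Prop := ∀ (A : List (List (Int × Int))) (v : List (List (Int × Int))), Dom_accionmatrizvectorCplx A v → Pre_accionmatrizvectorCplx A v → Spec_accionmatrizvectorCplx A v (accionmatrizvectorCplx A v)

-- ===== LEMMAS AND PROOFS =====

-- A's outer loop (matriz = matriz + [x]) is a map over the row indices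
theorem pv_foldl_append_map {α β : Type} (g : α → β) :
    ∀ (l : List α) (acc : List β), l.foldl (fun m i => m ++ [g i]) acc = acc ++ l.map g := by
  intro l
  induction l with
  | nil => intro acc; simp
  | cons x xs ih => intro acc; simp [List.foldl, ih]

theorem pv_getD_map_range {α : Type} (g : ℕ → α) (n i : ℕ) (d : α) (h : i < n) :
    ((List.range n).map g).getD i d = g i := by
  simp [List.getD, h]

-- invariant of B's column loop: after processing the first m columns, entry i holds
-- row i's partial dot product over those m columns (inlined arithmetic)
theorem pv_Binv (A v : List (List (Int × Int))) : ∀ (m : ℕ),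
    (List.range m).foldl (fun result j =>
      let vj := (v.getD j []).getD 0 (0, 0)
      (List.range A.length).map (fun i =>
        let a := (A.getD i []).getD j (0, 0)
        let r := result.getD i (0, 0)
        (r.1 + a.1 * vj.1 - a.2 * vj.2, r.2 + a.1 * vj.2 + a.2 * vj.1)))
      (List.replicate A.length ((0 : Int), (0 : Int)))
    = (List.range A.length).map (fun i =>
        (List.range m).foldl (fun suma j =>
          let vj := (v.getD j []).getD 0 (0, 0)
          let a := (A.getD i []).getD j (0, 0)
          (suma.1 + a.1 * vj.1 - a.2 * vj.2, suma.2 + a.1 * vj.2 + a.2 * vj.1)) ((0 : Int), (0 : Int))) := by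
  intro m
  induction m with
  | zero =>
    simp
  | succ m ih =>
    simp only [List.range_succ, List.foldl_append, List.foldl_cons, List.foldl_nil]
    rw [ih]
    apply List.map_congr_left
    intro i hi
    have hlt : i < A.length := List.mem_range.mp hi
    rw [pv_getD_map_range _ _ _ _ hlt]

-- ===== VERDICT (by name: the statement is the Claim_ definition above) =====
theorem accionmatrizvectorCplx_spec : Claim_equal_accionmatrizvectorCplx := by
  intro A v _ _
  unfold Spec_accionmatrizvectorCplx accionmatrizvectorCplx accionmatrizvectorCplx_alt
  simp only []
  rw [pv_foldl_append_map, pv_Binv, List.nil_append]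
  apply List.map_congr_left
  intro i _
  have hstep : (fun (suma : Int × Int) (j : ℕ) =>
      sumacplx suma (multcplx ((A.getD i []).getD j (0, 0)) ((v.getD j []).getD 0 (0, 0))))
    = (fun (suma : Int × Int) (j : ℕ) =>
      let vj := (v.getD j []).getD 0 (0, 0)
      let a := (A.getD i []).getD j (0, 0)
      (suma.1 + a.1 * vj.1 - a.2 * vj.2, suma.2 + a.1 * vj.2 + a.2 * vj.1)) := by
    funext suma j
    simp only [sumacplx, multcplx, Prod.mk.injEq]
    constructor <;> ring
  rw [hstep]
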